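-- pv_equiv track=rewrite | github.com/CarpseDeam/AurA-Ev0 | src/aura/tools/symbol_tools.py | _collect_descendants
-- ===== SOURCE A (Python) =====
-- def _collect_descendants(
--     class_name: str,
--     children_map: dict[str, list[str]],
--     visited: set[str] | None = None,
-- ) -> list[str]:
--     visited = visited or set()
--     visited.add(class_name)
--     descendants: list[str] = []
--
--     for child in children_map.get(class_name, []):
--         descendants.append(child)
--         if child not in visited:
--             descendants.extend(_collect_descendants(child, children_map, visited))
--     return descendants
-- ===== SOURCE B (Python) =====
-- _SENTINEL = object()
--
--
-- def _collect_descendants(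
--     class_name: str,
--     children_map: dict[str, list[str]],
--     visited: set[str] | None = None,
-- ) -> list[str]:
--     visited = visited or set()
--     visited.add(class_name)
--     out: list[str] = []
--     pending = [iter(children_map.get(class_name, []))]
--
--     while pending:
--         child = next(pending[-1], _SENTINEL)
--         if child is _SENTINEL:
--             pending.pop()
--             continue
--         out.append(child)
--         if child not in visited:
--             visited.add(child)
--             pending.append(iter(children_map.get(child, [])))
--     return out
-- ===== Notes on version B (the rewrite author's own statement) =====
-- stated objective: alternative
-- what changed: Replaces the recursive DFS with an iterative loop over an explicit stack of child-iterators (no recursion, no intermediate list copies from extend), preserving the exact preorder output and the shared visited-set discipline.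
import Mathlib
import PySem

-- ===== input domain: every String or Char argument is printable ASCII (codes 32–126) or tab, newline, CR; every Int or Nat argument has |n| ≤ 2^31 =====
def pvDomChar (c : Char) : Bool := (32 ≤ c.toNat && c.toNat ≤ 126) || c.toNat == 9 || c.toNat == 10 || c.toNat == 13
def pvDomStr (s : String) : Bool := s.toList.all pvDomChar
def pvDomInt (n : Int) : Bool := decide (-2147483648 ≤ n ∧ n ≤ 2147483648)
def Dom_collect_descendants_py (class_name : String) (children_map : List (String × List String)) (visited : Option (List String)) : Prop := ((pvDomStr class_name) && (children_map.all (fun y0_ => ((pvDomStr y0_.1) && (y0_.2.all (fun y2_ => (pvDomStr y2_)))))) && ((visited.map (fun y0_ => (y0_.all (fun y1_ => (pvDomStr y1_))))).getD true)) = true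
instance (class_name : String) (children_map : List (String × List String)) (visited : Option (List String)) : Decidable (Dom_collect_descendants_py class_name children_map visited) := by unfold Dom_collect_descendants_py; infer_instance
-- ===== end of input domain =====

-- B is an iterative DFS over an explicit stack of child-iterators instead of A's recursion; same
-- return value; like A, the Python B mutates the caller's `visited` set (same additions).

-- all child names occurring anywhere in the map's values (used only for totality guards)
def cdPool (children_map : List (String × List String)) : List String :=
  (children_map.map Prod.snd).flatten

-- how many pool names are not yet visited (termination measure for B, fuel bound for A)
def cdBound (children_map : List (String × List String)) (v : List String) : Nat :=
  ((PySem.List.dedup (cdPool children_map)).filter (fun x => !(PySem.Set.contains v x))).length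

-- every element of a looked-up children list is in the pool (needed by B's stack invariant)
theorem cd_getD_mem_pool (children_map : List (String × List String)) (k : String) :
    ∀ c ∈ PySem.Dict.getD (PySem.Dict.mk children_map) k [], c ∈ cdPool children_map := by
  intro c hc
  induction children_map with
  | nil => simp [PySem.Dict.getD, PySem.Dict.get?] at hc
  | cons p rest ih =>
    rw [PySem.Dict.getD] at hc ih
    rw [PySem.Dict.get?_mk_cons] at hc
    simp only [cdPool, List.map_cons, List.flatten_cons, List.mem_append]
    by_cases h : p.1 == k
    · rw [if_pos h] at hc
      simp at hc
      exact Or.inl hc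
    · rw [if_neg h] at hc
      exact Or.inr (ih hc)

-- visiting a fresh pool name strictly decreases the measure (cited by loopB's decreasing_by)
theorem cdBound_add_lt (children_map : List (String × List String)) (v : List String)
    (c : String) (hc : c ∈ cdPool children_map) (hv : ¬ PySem.Set.contains v c = true) :
    cdBound children_map (PySem.Set.add v c) < cdBound children_map v := by
  have hcv : c ∉ v := fun h => hv ((PySem.Set.contains_iff v c).mpr h)
  have hmem : c ∈ PySem.List.dedup (cdPool children_map) := by
    rw [PySem.List.mem_dedup]; exact hc
  unfold cdBound
  obtain ⟨l1, l2, hsplit⟩ := List.append_of_mem hmem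
  rw [hsplit]
  simp only [List.filter_append, List.filter_cons, List.length_append]
  rw [if_neg (by
        simp only [Bool.not_eq_true', Bool.not_eq_false]
        exact (PySem.Set.contains_iff _ c).mpr ((PySem.Set.mem_add v c c).mpr (Or.inr rfl))),
      if_pos (by
        simp only [Bool.not_eq_true', ← Bool.not_eq_true]
        exact fun h => hcv ((PySem.Set.contains_iff v c).mp h))]
  have h1 : ∀ l : List String,
      (l.filter (fun x => !PySem.Set.contains (PySem.Set.add v c) x)).length ≤
      (l.filter (fun x => !PySem.Set.contains v x)).length := by
    intro l
    rw [← List.countP_eq_length_filter, ← List.countP_eq_length_filter]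
    refine List.countP_mono_left (fun x _ hx => ?_)
    simp only [Bool.not_eq_eq_eq_not, Bool.not_true, ← Bool.not_eq_true,
      PySem.Set.contains_iff] at hx ⊢
    exact fun h => hx ((PySem.Set.mem_add v c x).mpr (Or.inl h))
  have := h1 l1
  have := h1 l2
  simp only [List.length_cons]
  omega

-- ===== PORT A =====
-- the body of A's `for child in …` loop; `g` is the recursive call at the next fuel level
def stepA (g : String → List String → List String × List String)
    (st : List String × List String) (child : String) : List String × List String :=
  let descendants := st.1 ++ [child]
  if PySem.Set.contains st.2 child then (descendants, st.2)
  else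
    let r := g child st.2
    (descendants ++ r.1, r.2)

-- A's recursion, threading the (shared, mutated) visited set through; fuel is a totality guard
-- only: depth never exceeds (cdPool cm).length + 1, so the port's fuel below is never exhausted
def goA : Nat → String → List (String × List String) → List String → List String × List String
  | 0, _, _, visited => ([], visited)
  | fuel + 1, name, cm, visited =>
    (PySem.Dict.getD (PySem.Dict.mk cm) name []).foldl
      (fun st child => stepA (fun c w => goA fuel c cm w) st child)
      ([], PySem.Set.add visited name)

def collect_descendants_py (class_name : String) (children_map : List (String × List String)) (visited : Option (List String)) : List String :=
  -- `visited = visited or set()`: None and the empty set both become the empty set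
  (goA ((cdPool children_map).length + 1) class_name children_map (visited.getD [])).1

-- ===== PORT B =====
-- the while-loop: stack of iterators (= remaining-children lists), top of stack first; the
-- invariant hypothesis (all stacked names come from the map's values) only serves termination
def loopB (cm : List (String × List String)) (v : List String) (desc : List String) :
    (stack : List (List String)) → (∀ l ∈ stack, ∀ c ∈ l, c ∈ cdPool cm) → List String
  | [], _ => desc
  | [] :: rest, h => loopB cm v desc rest (fun l hl => h l (List.mem_cons_of_mem _ hl))
  | (c :: cs) :: rest, h =>
    if PySem.Set.contains v c then
      loopB cm v (desc ++ [c]) (cs :: rest)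
        (by intro l hl x hx
            cases hl with
            | head => exact h _ (.head _) x (List.mem_cons_of_mem _ hx)
            | tail _ hl => exact h _ (.tail _ hl) x hx)
    else
      loopB cm (PySem.Set.add v c) (desc ++ [c])
        (PySem.Dict.getD (PySem.Dict.mk cm) c [] :: cs :: rest)
        (by intro l hl x hx
            cases hl with
            | head => exact cd_getD_mem_pool cm c x hx
            | tail _ hl =>
              cases hl with
              | head => exact h _ (.head _) x (List.mem_cons_of_mem _ hx)
              | tail _ hl => exact h _ (.tail _ hl) x hx)
  termination_by stack _ => (cdBound cm v, (stack.map List.length).sum + stack.length)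
  decreasing_by
  · apply Prod.Lex.right; simp; try omega
  · apply Prod.Lex.right; simp; try omega
  · exact Prod.Lex.left _ _ (cdBound_add_lt cm v c (h _ (.head _) _ (.head _)) (by assumption))

def collect_descendants_py_alt (class_name : String) (children_map : List (String × List String)) (visited : Option (List String)) : List String :=
  loopB children_map (PySem.Set.add (visited.getD []) class_name) []
    [PySem.Dict.getD (PySem.Dict.mk children_map) class_name []]
    (by intro l hl; rcases hl with _ | ⟨_, hl⟩
        · exact cd_getD_mem_pool children_map class_name
        · cases hl)

-- ===== PRECONDITION & SPEC =====
def Spec_collect_descendants_py (class_name : String) (children_map : List (String × List String)) (visited : Option (List String)) (out : List String) : Prop := out = collect_descendants_py_alt class_name children_map visited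
instance (class_name : String) (children_map : List (String × List String)) (visited : Option (List String)) (out : List String) : Decidable (Spec_collect_descendants_py class_name children_map visited out) := by unfold Spec_collect_descendants_py; infer_instance

-- ===== CLAIM (what is proved, stated in full; the proofs are below) =====
def Claim_equal_collect_descendants_py : Prop := ∀ (class_name : String) (children_map : List (String × List String)) (visited : Option (List String)), Dom_collect_descendants_py class_name children_map visited → Spec_collect_descendants_py class_name children_map visited (collect_descendants_py class_name children_map visited)

-- ===== LEMMAS AND PROOFS =====

-- shifting the descendants accumulator out of an A-style fold
theorem foldA_shift (g : String → List String → List String × List String)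
    (cs : List String) (d v : List String) :
    cs.foldl (fun st child => stepA g st child) (d, v)
      = (d ++ (cs.foldl (fun st child => stepA g st child) ([], v)).1,
         (cs.foldl (fun st child => stepA g st child) ([], v)).2) := by
  induction cs generalizing d v with
  | nil => simp
  | cons c cs ih =>
    rw [List.foldl_cons, List.foldl_cons]
    by_cases h : PySem.Set.contains v c
    · rw [show stepA g (d, v) c = (d ++ [c], v) from by simp only [stepA]; rw [if_pos h]; try simp,
          show stepA g ([], v) c = ([c], v) from by simp only [stepA]; rw [if_pos h]; try simp,
          ih (d ++ [c]) v, ih [c] v]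
      simp
    · rw [show stepA g (d, v) c = (d ++ [c] ++ (g c v).1, (g c v).2) from by simp only [stepA]; rw [if_neg h]; try simp,
          show stepA g ([], v) c = ([c] ++ (g c v).1, (g c v).2) from by simp only [stepA]; rw [if_neg h]; try simp,
          ih (d ++ [c] ++ (g c v).1) (g c v).2, ih ([c] ++ (g c v).1) (g c v).2]
      simp


-- the visited set only grows (fold form)
theorem foldA_mono (g : String → List String → List String × List String)
    (hg : ∀ c w, w ⊆ (g c w).2) (cs : List String) (d v : List String) :
    v ⊆ (cs.foldl (fun st child => stepA g st child) (d, v)).2 := by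
  induction cs generalizing d v with
  | nil => simp
  | cons c cs ih =>
    rw [List.foldl_cons]
    by_cases h : PySem.Set.contains v c
    · rw [show stepA g (d, v) c = (d ++ [c], v) from by simp only [stepA]; rw [if_pos h]; try simp]
      exact ih _ _
    · rw [show stepA g (d, v) c = (d ++ [c] ++ (g c v).1, (g c v).2) from by simp only [stepA]; rw [if_neg h]; try simp]
      exact List.Subset.trans (hg c v) (ih _ _)


theorem goA_mono (fuel : Nat) (name : String) (cm : List (String × List String))
    (v : List String) : v ⊆ (goA fuel name cm v).2 := by
  induction fuel generalizing name v with
  | zero => simp [goA]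
  | succ fuel ih =>
    rw [goA]
    refine List.Subset.trans ?_ (foldA_mono _ (fun c w => ih c w) _ _ _)
    intro x hx
    exact (PySem.Set.mem_add v name x).mpr (Or.inl hx)


-- pool names outside a bigger visited set are fewer
theorem cdBound_anti (cm : List (String × List String)) (v w : List String) (h : v ⊆ w) :
    cdBound cm w ≤ cdBound cm v := by
  unfold cdBound
  rw [← List.countP_eq_length_filter, ← List.countP_eq_length_filter]
  refine List.countP_mono_left (fun x _ hx => ?_)
  simp only [Bool.not_eq_eq_eq_not, Bool.not_true, ← Bool.not_eq_true,
    PySem.Set.contains_iff] at hx ⊢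
  exact fun hv => hx (h hv)


-- fuel irrelevance: any two fuels above the measure give the same result
theorem goA_irrel (n : Nat) : ∀ (f g : Nat) (name : String)
    (cm : List (String × List String)) (v : List String),
    cdBound cm (PySem.Set.add v name) ≤ n → n < f → n < g →
    goA f name cm v = goA g name cm v := by
  induction n using Nat.strong_induction_on with
  | _ n IH =>
  intro f g name cm v hb hf hg
  obtain ⟨f, rfl⟩ : ∃ f', f = f' + 1 := ⟨f - 1, by omega⟩
  obtain ⟨g, rfl⟩ : ∃ g', g = g' + 1 := ⟨g - 1, by omega⟩
  rw [goA, goA]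
  suffices H : ∀ cs : List String, (∀ c ∈ cs, c ∈ cdPool cm) → ∀ d w, cdBound cm w ≤ n →
      cs.foldl (fun st c => stepA (fun c w => goA f c cm w) st c) (d, w)
        = cs.foldl (fun st c => stepA (fun c w => goA g c cm w) st c) (d, w) by
    exact H _ (cd_getD_mem_pool cm name) [] _ hb
  intro cs
  induction cs with
  | nil => simp
  | cons c cs ihc =>
    intro hcs d w hw
    rw [List.foldl_cons, List.foldl_cons]
    by_cases hc : PySem.Set.contains w c
    · rw [show stepA (fun c w => goA f c cm w) (d, w) c = (d ++ [c], w) from by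
            simp only [stepA]; rw [if_pos hc],
          show stepA (fun c w => goA g c cm w) (d, w) c = (d ++ [c], w) from by
            simp only [stepA]; rw [if_pos hc]]
      exact ihc (fun x hx => hcs x (.tail _ hx)) _ w hw
    · have hlt : cdBound cm (PySem.Set.add w c) < cdBound cm w :=
        cdBound_add_lt cm w c (hcs c (.head _)) hc
      have hceq : goA f c cm w = goA g c cm w :=
        IH (cdBound cm (PySem.Set.add w c)) (by omega) f g c cm w le_rfl (by omega) (by omega)
      rw [show stepA (fun c w => goA f c cm w) (d, w) c
            = (d ++ [c] ++ (goA f c cm w).1, (goA f c cm w).2) from by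
            simp only [stepA]; rw [if_neg hc],
          show stepA (fun c w => goA g c cm w) (d, w) c
            = (d ++ [c] ++ (goA g c cm w).1, (goA g c cm w).2) from by
            simp only [stepA]; rw [if_neg hc],
          hceq]
      exact ihc (fun x hx => hcs x (.tail _ hx)) _ _
        (le_trans (cdBound_anti cm w _ (goA_mono g c cm w)) hw)


-- what B's loop computes, frame by frame, expressed with A's fold
def flushA (cm : List (String × List String)) : List (List String) → List String → List String
  | [], _ => []
  | cs :: rest, v =>
    let r := cs.foldl (fun st child => stepA (fun c w => goA (cdPool cm).length c cm w) st child) ([], v)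
    r.1 ++ flushA cm rest r.2

theorem loopB_eq_flushA (cm : List (String × List String)) (v desc : List String)
    (stack : List (List String)) (h : ∀ l ∈ stack, ∀ c ∈ l, c ∈ cdPool cm) :
    loopB cm v desc stack h = desc ++ flushA cm stack v := by
  induction v, desc, stack, h using loopB.induct cm with
  | case1 v desc x h' => simp [loopB, flushA]
  | case2 v desc rest h h' ih => rw [loopB]; rw [ih]; simp [flushA]
  | case3 v desc c cs rest h hc h' ih =>
    rw [loopB, if_pos hc, ih]
    have he : flushA cm ((c :: cs) :: rest) v = [c] ++ flushA cm (cs :: rest) v := by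
      rw [flushA, flushA]
      rw [List.foldl_cons,
        show stepA (fun c w => goA (cdPool cm).length c cm w) ([], v) c = ([c], v) from by
          simp only [stepA]; rw [if_pos hc]; try simp,
        foldA_shift _ cs [c] v]
      simp
    rw [he]; simp
  | case4 v desc c cs rest h hc h' ih =>
    rw [loopB, if_neg hc, ih]
    have hcpool : c ∈ cdPool cm := h _ (.head _) _ (.head _)
    have hbnd : cdBound cm (PySem.Set.add v c) < (cdPool cm).length := by
      have h1 : cdBound cm (PySem.Set.add v c) < cdBound cm v := cdBound_add_lt cm v c hcpool hc
      have h2 : cdBound cm v ≤ (PySem.List.dedup (cdPool cm)).length := by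
        rw [cdBound, ← List.countP_eq_length_filter]
        exact List.countP_le_length
      have h3 : (PySem.List.dedup (cdPool cm)).length ≤ (cdPool cm).length := by
        rw [PySem.List.dedup_eq_ofList]
        exact PySem.Set.length_ofList_le _
      omega
    have hgo : (PySem.Dict.getD (PySem.Dict.mk cm) c []).foldl
          (fun st child => stepA (fun c w => goA (cdPool cm).length c cm w) st child)
          ([], PySem.Set.add v c)
        = goA (cdPool cm).length c cm v := by
      rw [show goA (cdPool cm).length c cm v = goA ((cdPool cm).length + 1) c cm v from
            goA_irrel (cdBound cm (PySem.Set.add v c)) _ _ c cm v le_rfl hbnd (by omega)]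
      rw [goA]
    have he : flushA cm ((c :: cs) :: rest) v
        = [c] ++ flushA cm (PySem.Dict.getD (PySem.Dict.mk cm) c [] :: cs :: rest) (PySem.Set.add v c) := by
      rw [flushA]
      rw [List.foldl_cons,
        show stepA (fun c w => goA (cdPool cm).length c cm w) ([], v) c
            = ([c] ++ (goA (cdPool cm).length c cm v).1, (goA (cdPool cm).length c cm v).2) from by
          simp only [stepA]; rw [if_neg hc]; try simp,
        foldA_shift]
      rw [show flushA cm (PySem.Dict.getD (PySem.Dict.mk cm) c [] :: cs :: rest) (PySem.Set.add v c)
            = (goA (cdPool cm).length c cm v).1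
              ++ flushA cm (cs :: rest) (goA (cdPool cm).length c cm v).2 from by
          rw [flushA]; rw [hgo]]
      rw [flushA]
      simp
    rw [he]
    simp


-- ===== VERDICT (by name: the statement is the Claim_ definition above) =====
theorem collect_descendants_py_spec : Claim_equal_collect_descendants_py := by
  intro class_name cm visited _
  unfold Spec_collect_descendants_py collect_descendants_py collect_descendants_py_alt
  rw [loopB_eq_flushA]
  simp [flushA, goA]
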